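-- pv_equiv track=rewrite | github.com/syazra/prak-daspro | Hackerrank/8/8B1_Soal Bergambar.py | Kiri
-- ===== SOURCE A (Python) =====
-- def Konsi(S,e):
--     return S + [e]
--
-- def LastElmt(S):
--     return S[-1]
--
-- def Head(S):
--     return S[:-1]
--
-- def IsEmpty(S):
--     return S == []
--
-- def Kiri1(S, X):
--     if IsEmpty(S) or X == 0:
--         return []
--     else:
--         return Konsi(Kiri1(Head(S), X-1), LastElmt(S))
--
-- def Kiri(S, X):
--     if IsEmpty(S) or X == 0:
--         return []
--     else:
--         if LastElmt(S) == X: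
--             return Kiri1(Head(S), X)
--         else:
--             return Kiri(Head(S), X)
-- ===== SOURCE B (Python) =====
-- def Kiri(S, X):
--     # one right-to-left scan for the last occurrence of X, then a single slice
--     for j in range(len(S) - 1, -1, -1):
--         if S[j] == X:
--             return S[max(j - X, 0):j]
--     return []
-- ===== Notes on version B (the rewrite author's own statement) =====
-- stated objective: faster
-- what changed: Replaces the double recursion (which copies S[:-1] at every step and re-walks the prefix with Kiri1) by a single right-to-left index scan for the last occurrence of X followed by one slice.
-- intended difference: For X < 0 occurring in S past index 0, A returns the whole prefix before the last occurrence (leftover recursion state in Kiri1, since X-1 never reaches 0), while B returns [], the intended 'X elements' for a non-positive count. — e.g. on Kiri([5, -2], -2): A returns [5], B returns []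
import Mathlib
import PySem

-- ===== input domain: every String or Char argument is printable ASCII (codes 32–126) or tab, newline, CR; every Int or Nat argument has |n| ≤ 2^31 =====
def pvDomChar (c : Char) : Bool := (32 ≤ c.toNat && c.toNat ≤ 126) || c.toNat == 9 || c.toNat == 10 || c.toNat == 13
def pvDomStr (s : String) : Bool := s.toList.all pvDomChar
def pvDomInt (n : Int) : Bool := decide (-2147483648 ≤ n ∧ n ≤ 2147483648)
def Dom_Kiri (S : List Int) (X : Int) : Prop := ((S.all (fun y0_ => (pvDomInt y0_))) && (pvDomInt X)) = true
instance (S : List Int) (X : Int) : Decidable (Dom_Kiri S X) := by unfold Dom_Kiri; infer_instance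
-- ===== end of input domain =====

-- B replaces A's double recursion (copying S[:-1] each step) by one right-to-left scan plus a slice (faster);
-- for X < 0 occurring past index 0, A returns the whole prefix (Kiri1 leftover), B returns the intended [].


-- ===== PORT A =====
def Konsi (S : List Int) (e : Int) : List Int := S ++ [e]

-- S[-1]; only applied to nonempty S (guarded by PyIsEmpty), where pyGetD with a default is exact
def LastElmt (S : List Int) : Int := PySem.List.pyGetD S (-1) 0

-- S[:-1]
def Head (S : List Int) : List Int := PySem.List.slice S none (some (-1))

def PyIsEmpty (S : List Int) : Bool := S == []

theorem head_length_lt (S : List Int) (h : S ≠ []) : (Head S).length < S.length := by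
  simp only [Head, PySem.List.slice_to_neg_one, List.length_dropLast]
  have : S.length ≠ 0 := by simpa [List.length_eq_zero_iff] using h
  omega

def Kiri1 (S : List Int) (X : Int) : List Int :=
  if h : PyIsEmpty S || X == 0 then []
  else Konsi (Kiri1 (Head S) (X - 1)) (LastElmt S)
termination_by S.length
decreasing_by
  refine head_length_lt S ?_
  simp [PyIsEmpty] at h
  exact h.1

def Kiri (S : List Int) (X : Int) : List Int :=
  if h : PyIsEmpty S || X == 0 then []
  else if LastElmt S == X then Kiri1 (Head S) X
  else Kiri (Head S) X
termination_by S.length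
decreasing_by
  all_goals refine head_length_lt S ?_
  all_goals simp [PyIsEmpty] at h
  all_goals exact h.1

-- ===== PORT B =====
def KiriAltLoop (S : List Int) (X : Int) : List Int → List Int
  | [] => []
  | j :: rest =>
    if PySem.List.pyGetD S j 0 == X then
      PySem.List.slice S (some (max (j - X) 0)) (some j)
    else KiriAltLoop S X rest

def Kiri_alt (S : List Int) (X : Int) : List Int :=
  KiriAltLoop S X (PySem.List.pyRange ((S.length : Int) - 1) (-1) (-1))

-- ===== PRECONDITION & SPEC =====
-- For X < 0 occurring in S past index 0, A returns the whole prefix before the last occurrence of X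
-- (leftover recursion state: Kiri1's X-1 counter never reaches 0), while B returns [], the intended
-- result of taking X elements for a non-positive count X.
def D_Kiri (S : List Int) (X : Int) : Prop := X < 0 ∧ X ∈ S.tail
instance (S : List Int) (X : Int) : Decidable (D_Kiri S X) := by unfold D_Kiri; infer_instance

def Spec_Kiri (S : List Int) (X : Int) (out : List Int) : Prop := ¬ D_Kiri S X → out = Kiri_alt S X
instance (S : List Int) (X : Int) (out : List Int) : Decidable (Spec_Kiri S X out) := by unfold Spec_Kiri; infer_instance

def pvDiffWitness_Kiri : List Int × Int := ([5, -2], -2)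
def pvDiffWitnessOut_Kiri : (List Int) × (List Int) := ([5], [])

-- ===== CLAIM (what is proved, stated in full; the proofs are below) =====
def Claim_unchanged_Kiri : Prop := ∀ (S : List Int) (X : Int), Dom_Kiri S X → Spec_Kiri S X (Kiri S X)
def Claim_changed_Kiri : Prop := Dom_Kiri (pvDiffWitness_Kiri.1) (pvDiffWitness_Kiri.2) ∧ D_Kiri (pvDiffWitness_Kiri.1) (pvDiffWitness_Kiri.2) ∧ Kiri (pvDiffWitness_Kiri.1) (pvDiffWitness_Kiri.2) = pvDiffWitnessOut_Kiri.1 ∧ Kiri_alt (pvDiffWitness_Kiri.1) (pvDiffWitness_Kiri.2) = pvDiffWitnessOut_Kiri.2 ∧ pvDiffWitnessOut_Kiri.1 ≠ pvDiffWitnessOut_Kiri.2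
def Claim_exact_Kiri : Prop := ∀ (S : List Int) (X : Int), Dom_Kiri S X → D_Kiri S X → Kiri S X ≠ Kiri_alt S X

-- ===== LEMMAS AND PROOFS =====

theorem kiri1_closed (S : List Int) (X : Int) (hX : 0 ≤ X) :
    Kiri1 S X = S.drop (S.length - X.toNat) := by
  induction S using List.reverseRecOn generalizing X with
  | nil => rw [Kiri1]; simp [PyIsEmpty]
  | append_singleton T e ih =>
    by_cases h0 : X = 0
    · rw [Kiri1]; simp [h0]
    · rw [Kiri1, dif_neg (by simp [PyIsEmpty, h0])]
      simp only [Konsi, Head, LastElmt, PySem.List.slice_to_neg_one,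
        PySem.List.pyGetD_neg_one_append_singleton, List.dropLast_concat]
      rw [ih (X - 1) (by omega),
        List.drop_append_of_le_length (by simp; try omega)]
      congr 2
      simp only [List.length_append, List.length_cons, List.length_nil]
      omega

theorem altloop_skip_last (T : List Int) (e X : Int) (r : List Int)
    (hr : ∀ j ∈ r, 0 ≤ j ∧ j < (T.length : Int)) :
    KiriAltLoop (T ++ [e]) X r = KiriAltLoop T X r := by
  induction r with
  | nil => rfl
  | cons j rest ih =>
    obtain ⟨hj0, hjlt⟩ := hr j (by simp)
    have hget : PySem.List.pyGetD (T ++ [e]) j 0 = PySem.List.pyGetD T j 0 := by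
      rw [PySem.List.pyGetD_eq_getElem (i := j) _ 0 hj0 (by simp only [List.length_append]; push_cast; omega),
          PySem.List.pyGetD_eq_getElem (i := j) _ 0 hj0 (by omega)]
      exact List.getElem_append_left (by omega)
    simp only [KiriAltLoop, hget]
    split
    · rw [PySem.List.slice_toNat _ (le_max_right _ _) hj0,
          PySem.List.slice_toNat _ (le_max_right _ _) hj0]
      by_cases ha : (max (j - X) 0).toNat ≤ j.toNat
      · rw [List.drop_append_of_le_length (by omega),
            List.take_append_of_le_length (by simp only [List.length_drop]; omega)]
      · rw [Nat.sub_eq_zero_of_le (by omega)]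
        simp
    · exact ih (fun j hj => hr j (by simp [hj]))

theorem altloop_nonpos (S : List Int) (X : Int) (r : List Int) (hX : X ≤ 0)
    (hr : ∀ j ∈ r, 0 ≤ j) : KiriAltLoop S X r = [] := by
  induction r with
  | nil => rfl
  | cons j rest ih =>
    have hj0 := hr j (by simp)
    simp only [KiriAltLoop]
    split
    · rw [PySem.List.slice_toNat _ (le_max_right _ _) hj0,
        Nat.sub_eq_zero_of_le (by omega)]
      simp
    · exact ih (fun j hj => hr j (by simp [hj]))

theorem alt_nonpos (S : List Int) (X : Int) (hX : X ≤ 0) : Kiri_alt S X = [] := by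
  refine altloop_nonpos S X _ hX (fun j hj => ?_)
  have := (PySem.List.mem_pyRange_neg_one).mp hj
  omega

theorem mem_tail_append (T : List Int) (e X : Int) (h : X ∈ T.tail) : X ∈ (T ++ [e]).tail := by
  cases T with
  | nil => simp at h
  | cons a t => simp_all

theorem kiri_ne_nil (S : List Int) (X : Int) (hX : X < 0) (hmem : X ∈ S.tail) :
    Kiri S X ≠ [] := by
  induction S using List.reverseRecOn with
  | nil => simp at hmem
  | append_singleton T e ih =>
    have h0 : X ≠ 0 := by omega
    rw [Kiri, dif_neg (by simp [PyIsEmpty, h0])]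
    simp only [LastElmt, Head, PySem.List.slice_to_neg_one,
      PySem.List.pyGetD_neg_one_append_singleton, List.dropLast_concat]
    cases T with
    | nil => simp at hmem
    | cons a t =>
      by_cases he : e = X
      · rw [if_pos (by simp [he])]
        rw [Kiri1, dif_neg (by simp [PyIsEmpty, h0])]
        simp [Konsi]
      · rw [if_neg (by simp [he])]
        refine ih ?_
        have : X ∈ t ++ [e] := by simpa using hmem
        simp only [List.tail_cons]
        rcases List.mem_append.mp this with h | h
        · exact h
        · simp at h; exact absurd h.symm he

theorem main_eq (S : List Int) (X : Int) : ¬ D_Kiri S X → Kiri S X = Kiri_alt S X := by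
  induction S using List.reverseRecOn with
  | nil =>
    intro _
    rw [Kiri, dif_pos (by simp [PyIsEmpty])]
    rw [Kiri_alt, PySem.List.pyRange_neg_one_eq_nil (by simp)]
    rfl
  | append_singleton T e ih =>
    intro hD
    by_cases h0 : X = 0
    · rw [alt_nonpos _ _ (by omega), Kiri, dif_pos (by simp [h0])]
    · rw [Kiri, dif_neg (by simp [PyIsEmpty, h0])]
      have hlen : ((T ++ [e]).length : Int) - 1 = (T.length : Int) := by
        simp only [List.length_append, List.length_cons, List.length_nil]; push_cast; ring
      have hcons := PySem.List.pyRange_neg_one_cons (a := (T.length : Int)) (b := -1) (by omega)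
      rw [Kiri_alt, hlen, hcons]
      have hget : PySem.List.pyGetD (T ++ [e]) (T.length : Int) 0 = e := by
        rw [PySem.List.pyGetD_eq_getElem (i := (T.length : Int)) _ 0 (by omega)
          (by simp; try omega)]
        simp
      simp only [KiriAltLoop, hget, LastElmt, Head, PySem.List.slice_to_neg_one,
        PySem.List.pyGetD_neg_one_append_singleton, List.dropLast_concat]
      by_cases he : e = X
      · rw [if_pos (by simp [he]), if_pos (by simp [he])]
        by_cases hX : 0 ≤ X
        · rw [kiri1_closed T X hX,
            PySem.List.slice_toNat _ (le_max_right _ _) (by omega)]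
          have ha : (max ((T.length : Int) - X) 0).toNat ≤ T.length := by omega
          rw [List.drop_append_of_le_length ha,
            List.take_append_of_le_length (by simp only [List.length_drop]; omega),
            List.take_of_length_le (by simp only [List.length_drop]; omega)]
          congr 1
          omega
        · cases T with
          | nil =>
            rw [Kiri1, dif_pos (by simp [PyIsEmpty])]
            rw [PySem.List.slice_toNat _ (le_max_right _ _) (by omega)]
            simp
          | cons a t =>
            exact absurd ⟨by omega, by simp [he]⟩ hD
      · rw [if_neg (by simp [he]), if_neg (by simp [he])]
        rw [altloop_skip_last T e X _ (fun j hj => by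
          have := (PySem.List.mem_pyRange_neg_one).mp hj
          omega)]
        exact ih (fun hD' => hD ⟨hD'.1, mem_tail_append T e X hD'.2⟩)

-- ===== VERDICT (by name: the statement is the Claim_ definition above) =====
theorem Kiri_spec : Claim_unchanged_Kiri := by
  intro S X _ hD
  exact main_eq S X hD

theorem Kiri_changed : Claim_changed_Kiri := by
  unfold Claim_changed_Kiri
  refine ⟨by decide, by decide, ?_, by decide, by decide⟩
  show Kiri [5, -2] (-2) = [5]
  rw [Kiri, dif_neg (by decide)]
  norm_num [LastElmt, Head, PySem.List.pyGetD, PySem.List.pyIdx?, PySem.List.slice]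
  rw [Kiri1, dif_neg (by decide)]
  rw [show Head [5] = ([] : List Int) from by decide]
  rw [Kiri1, dif_pos (by decide)]
  decide

theorem Kiri_tight : Claim_exact_Kiri := by
  intro S X _ hD
  rw [alt_nonpos S X (le_of_lt hD.1)]
  exact kiri_ne_nil S X hD.1 hD.2
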